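-- pv_equiv track=rewrite | github.com/JiruGutema/Tooran | D_For_Wizards_the_Exam_Is_Easy_but_I_Couldn_t_Handle_It.py | find_optimal_shift
-- ===== SOURCE A (Python) =====
-- def count_inversions(arr):
--     inv_count = 0
--     n = len(arr)
--     for i in range(n):
--         for j in range(i + 1, n):
--             if arr[i] > arr[j]:
--                 inv_count += 1
--     return inv_count
--
-- def cyclic_shift(arr, l, r):
--     if l == r:
--         return arr.copy()
--     shifted = arr.copy()
--     temp = shifted[l]
--     for i in range(l, r):
--         if i == r - 1:
--             shifted[i] = temp
--         else:
--             shifted[i] = shifted[i + 1]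
--         shifted[i] = shifted[i + 1]
--     shifted[r] = temp
--     return shifted
--
-- def find_optimal_shift(n, a):
--     initial_inversions = count_inversions(a)
--     min_inversions = initial_inversions
--     best_l, best_r = 1, 1
--
--     for l in range(n):
--         for r in range(l, n):
--             shifted = cyclic_shift(a, l, r)
--             current_inversions = count_inversions(shifted)
--             if current_inversions < min_inversions:
--                 min_inversions = current_inversions
--                 best_l, best_r = l + 1, r + 1  # Convert to 1-based indexing
--
--     return best_l, best_r
-- ===== SOURCE B (Python) =====
-- def find_optimal_shift(n, a):
--     # Incremental delta: rotating a[l] past a[l+1..r] changes the inversion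
--     # count by sum of (a[r]>a[l]) - (a[l]>a[r]); track the minimum delta.
--     best_d = 0
--     best_l, best_r = 1, 1
--     for l in range(n):
--         d = 0
--         for r in range(l + 1, n):
--             if a[r] > a[l]:
--                 d += 1
--             if a[l] > a[r]:
--                 d -= 1
--             if d < best_d:
--                 best_d = d
--                 best_l, best_r = l + 1, r + 1
--     return best_l, best_r
-- ===== Notes on version B (the rewrite author's own statement) =====
-- stated objective: faster
-- what changed: Instead of materializing every cyclic shift and recounting all inversions from scratch (O(n^4)), B observes that rotating a[l] to position r changes the inversion count by sum over j in (l,r] of (a[j]>a[l])-(a[l]>a[j]), accumulates that delta in O(1) per r, and tracks the minimum delta; the initial inversion count cancels out and is never computed.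
import Mathlib
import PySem

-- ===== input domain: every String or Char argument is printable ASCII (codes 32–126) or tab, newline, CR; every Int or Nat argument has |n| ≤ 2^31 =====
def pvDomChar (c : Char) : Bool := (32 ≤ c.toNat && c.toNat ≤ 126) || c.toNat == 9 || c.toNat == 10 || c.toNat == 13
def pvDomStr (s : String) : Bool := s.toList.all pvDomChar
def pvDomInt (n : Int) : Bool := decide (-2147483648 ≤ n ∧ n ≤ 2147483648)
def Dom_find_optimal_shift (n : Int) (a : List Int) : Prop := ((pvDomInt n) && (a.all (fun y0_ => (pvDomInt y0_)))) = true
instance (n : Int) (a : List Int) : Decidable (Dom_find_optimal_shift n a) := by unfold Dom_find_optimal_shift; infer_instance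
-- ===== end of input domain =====

-- B replaces A's O(n^4) shift-and-recount search by an O(n^2) incremental
-- inversion-delta scan; proved equal on all inputs where A returns.


-- ===== PORT A =====
-- indices used by A are nonnegative and in range under Pre_, so the total
-- pyGetD / pySetD forms are exact here
def count_inversions (arr : List Int) : Int :=
  let n : Int := arr.length
  (PySem.List.pyRange 0 n 1).foldl (fun inv i =>
    (PySem.List.pyRange (i + 1) n 1).foldl (fun inv j =>
      if PySem.List.pyGetD arr i 0 > PySem.List.pyGetD arr j 0 then inv + 1 else inv) inv) 0

def cyclic_shift (arr : List Int) (l r : Int) : List Int :=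
  if l == r then arr
  else
    let shifted := arr
    let temp := PySem.List.pyGetD shifted l 0
    let shifted := (PySem.List.pyRange l r 1).foldl (fun sh i =>
      let sh := if i == r - 1 then PySem.List.pySetD sh i temp
                else PySem.List.pySetD sh i (PySem.List.pyGetD sh (i + 1) 0)
      PySem.List.pySetD sh i (PySem.List.pyGetD sh (i + 1) 0)) shifted
    PySem.List.pySetD shifted r temp

def find_optimal_shift (n : Int) (a : List Int) : List Int :=
  let initial_inversions := count_inversions a
  let st := (PySem.List.pyRange 0 n 1).foldl (fun (st : Int × Int × Int) l =>
    (PySem.List.pyRange l n 1).foldl (fun (st : Int × Int × Int) r =>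
      let shifted := cyclic_shift a l r
      let current_inversions := count_inversions shifted
      if current_inversions < st.1 then (current_inversions, l + 1, r + 1) else st) st)
    (initial_inversions, 1, 1)
  [st.2.1, st.2.2]

-- ===== PORT B =====
def find_optimal_shift_alt (n : Int) (a : List Int) : List Int :=
  let st := (PySem.List.pyRange 0 n 1).foldl (fun (st : Int × Int × Int) l =>
    ((PySem.List.pyRange (l + 1) n 1).foldl (fun (q : Int × Int × Int × Int) r =>
      let d := if PySem.List.pyGetD a r 0 > PySem.List.pyGetD a l 0 then q.1 + 1 else q.1
      let d := if PySem.List.pyGetD a l 0 > PySem.List.pyGetD a r 0 then d - 1 else d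
      if d < q.2.1 then (d, d, l + 1, r + 1) else (d, q.2)) (0, st)).2)
    (0, 1, 1)
  [st.2.1, st.2.2]

-- ===== PRECONDITION & SPEC =====
-- Pre_ excludes exactly the inputs where A raises IndexError: cyclic_shift
-- writes at index r, which exceeds the list when 2 ≤ n and len a < n.
def Pre_find_optimal_shift (n : Int) (a : List Int) : Prop := n ≤ (a.length : Int) ∨ n ≤ 1
instance (n : Int) (a : List Int) : Decidable (Pre_find_optimal_shift n a) := by unfold Pre_find_optimal_shift; infer_instance

def pvWitness_find_optimal_shift : Int × List Int := (3, [2, 0, 1])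

def Spec_find_optimal_shift (n : Int) (a : List Int) (out : List Int) : Prop := out = find_optimal_shift_alt n a
instance (n : Int) (a : List Int) (out : List Int) : Decidable (Spec_find_optimal_shift n a out) := by unfold Spec_find_optimal_shift; infer_instance

-- ===== CLAIM (what is proved, stated in full; the proofs are below) =====
def Claim_equal_find_optimal_shift : Prop := ∀ (n : Int) (a : List Int), Dom_find_optimal_shift n a → Pre_find_optimal_shift n a → Spec_find_optimal_shift n a (find_optimal_shift n a)

-- ===== LEMMAS AND PROOFS =====

-- number of inverted pairs, structurally
def pvInv : List Int → Int
  | [] => 0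
  | x :: xs => ((xs.countP (fun y => decide (y < x)) : Nat) : Int) + pvInv xs

-- cross inversions between two adjacent blocks
def pvC (xs ys : List Int) : Int :=
  (xs.map (fun x => ((ys.countP (fun y => decide (y < x)) : Nat) : Int))).sum

-- inversion-count delta caused by rotating x past m
def pvD (x : Int) (m : List Int) : Int :=
  ((m.countP (fun y => decide (x < y)) : Nat) : Int)
    - ((m.countP (fun y => decide (y < x)) : Nat) : Int)

theorem pvInv_append (xs ys : List Int) :
    pvInv (xs ++ ys) = pvInv xs + pvInv ys + pvC xs ys := by
  induction xs with
  | nil => simp [pvInv, pvC]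
  | cons x xs ih =>
      simp only [List.cons_append, pvInv, ih, List.countP_append, pvC, List.map_cons,
        List.sum_cons]
      push_cast
      ring

theorem pvC_perm_right (xs : List Int) {ys ys' : List Int} (h : ys.Perm ys') :
    pvC xs ys = pvC xs ys' := by
  unfold pvC
  congr 1
  exact List.map_congr_left (fun x _ => by rw [h.countP_eq])

theorem pvC_perm_left {xs xs' : List Int} (ys : List Int) (h : xs.Perm xs') :
    pvC xs ys = pvC xs' ys :=
  (h.map _).sum_eq

theorem pvC_singleton (m : List Int) (x : Int) :
    pvC m [x] = ((m.countP (fun y => decide (x < y)) : Nat) : Int) := by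
  unfold pvC
  rw [← PySem.List.sum_map_ite_one_zero (fun y => decide (x < y)) m]
  congr 1
  apply List.map_congr_left
  intro y _
  by_cases h : x < y <;> simp [h]

theorem pvD_append_singleton (x y : Int) (m : List Int) :
    pvD x (m ++ [y]) = pvD x m + (if x < y then 1 else 0) - (if y < x then 1 else 0) := by
  simp only [pvD, List.countP_append, List.countP_singleton]
  by_cases h1 : x < y <;> by_cases h2 : y < x <;> simp [h1, h2] <;> omega

theorem pvInv_rot (p m s : List Int) (x : Int) :
    pvInv (p ++ (m ++ x :: s)) = pvInv (p ++ x :: (m ++ s)) + pvD x m := by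
  have hl : p ++ (m ++ x :: s) = p ++ ((m ++ [x]) ++ s) := by simp
  have hr : p ++ x :: (m ++ s) = p ++ ((x :: m) ++ s) := by simp
  have hperm : ((m ++ [x]) ++ s).Perm ((x :: m) ++ s) :=
    (List.perm_append_singleton x m).append_right s
  have e3 : pvInv (x :: m) = ((m.countP (fun y => decide (y < x)) : Nat) : Int) + pvInv m := rfl
  have e4 : pvInv [x] = (0 : Int) := rfl
  rw [hl, hr]
  simp only [pvInv_append]
  rw [pvC_perm_right p hperm, pvC_perm_left s (List.perm_append_singleton x m),
    pvC_singleton, e3, e4]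
  unfold pvD
  ring

theorem sum_range_countP (arr : List Int) :
    ((List.range arr.length).map
      (fun k => (((arr.drop (k+1)).countP (fun y => decide (y < arr.getD k 0)) : Nat) : Int))).sum
    = pvInv arr := by
  induction arr with
  | nil => simp [pvInv]
  | cons x xs ih =>
      rw [List.length_cons, List.range_succ_eq_map, List.map_cons, List.map_map, List.sum_cons]
      have h2 : (List.range xs.length).map
          ((fun k => ((((x :: xs).drop (k+1)).countP
              (fun y => decide (y < (x :: xs).getD k 0)) : Nat) : Int)) ∘ Nat.succ)
          = (List.range xs.length).map
            (fun k => (((xs.drop (k+1)).countP (fun y => decide (y < xs.getD k 0)) : Nat) : Int)) := by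
        apply List.map_congr_left
        intro k _
        simp [Function.comp, Nat.succ_eq_add_one, List.drop_succ_cons]
      rw [h2, ih]
      simp [pvInv]

theorem count_inversions_eq_pvInv (arr : List Int) : count_inversions arr = pvInv arr := by
  have hcong : ∀ (acc : Int), ∀ i ∈ PySem.List.pyRange 0 (arr.length : Int) 1,
      (PySem.List.pyRange (i + 1) (arr.length : Int) 1).foldl
        (fun inv j => if PySem.List.pyGetD arr j 0 < PySem.List.pyGetD arr i 0 then inv + 1 else inv) acc
      = acc + (((arr.drop (i+1).toNat).countP
          (fun y => decide (y < PySem.List.pyGetD arr i 0)) : Nat) : Int) := by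
    intro acc i hi
    rw [PySem.List.mem_pyRange_one] at hi
    rw [PySem.List.foldl_ite_add_one
      (fun j => PySem.List.pyGetD arr j 0 < PySem.List.pyGetD arr i 0)]
    rw [show (fun j => decide (PySem.List.pyGetD arr j 0 < PySem.List.pyGetD arr i 0))
        = ((fun y => decide (y < PySem.List.pyGetD arr i 0)) ∘ (fun j => PySem.List.pyGetD arr j 0))
        from rfl]
    rw [← List.countP_map, PySem.List.map_pyGetD_pyRange' arr 0 (by omega)]
  simp only [count_inversions, gt_iff_lt]
  rw [PySem.List.foldl_congr_mem _ _
    (fun inv i => inv + (((arr.drop (i+1).toNat).countP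
      (fun y => decide (y < PySem.List.pyGetD arr i 0)) : Nat) : Int)) _ hcong]
  rw [PySem.List.foldl_add, PySem.List.pyRange_zero_natCast, zero_add, List.map_map]
  rw [← sum_range_countP arr]
  congr 1
  apply List.map_congr_left
  intro k _
  have ht : ((k : Int) + 1).toNat = k + 1 := by omega
  simp [Function.comp, ht, PySem.List.pyGetD_natCast]

theorem cyclic_shift_self (a : List Int) (i : Int) : cyclic_shift a i i = a := by
  simp [cyclic_shift]

theorem getD_set_ne (xs : List Int) (i j : Nat) (v : Int) (h : i ≠ j) :
    (xs.set i v).getD j 0 = xs.getD j 0 := by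
  rw [List.getD_eq_getElem?_getD, List.getD_eq_getElem?_getD, List.getElem?_set_ne h]

theorem shift_body_eq (temp c : Int) (sh : List Int) (k : Nat) :
    PySem.List.pySetD
      (if ((k : Int) == c - 1) then PySem.List.pySetD sh (k : Int) temp
        else PySem.List.pySetD sh (k : Int) (PySem.List.pyGetD sh ((k : Int) + 1) 0))
      (k : Int)
      (PySem.List.pyGetD
        (if ((k : Int) == c - 1) then PySem.List.pySetD sh (k : Int) temp
          else PySem.List.pySetD sh (k : Int) (PySem.List.pyGetD sh ((k : Int) + 1) 0))
        ((k : Int) + 1) 0)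
    = sh.set k (sh.getD (k+1) 0) := by
  have hcast : ((k : Int) + 1) = ((k + 1 : Nat) : Int) := by push_cast; ring
  cases hb : ((k : Int) == c - 1) <;>
    simp only [hb, ite_true, ite_false, Bool.false_eq_true, PySem.List.pySetD_natCast, hcast,
      PySem.List.pyGetD_natCast, getD_set_ne sh k (k+1) _ (by omega), List.set_set]

theorem shift_loop (a : List Int) (l r : Nat) (c temp : Int) (hr : r < a.length) :
    ∀ j : Nat, l + j ≤ r →
    (PySem.List.pyRange (l : Int) ((l : Int) + (j : Int)) 1).foldl
      (fun sh i =>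
        PySem.List.pySetD
          (if (i == c - 1) then PySem.List.pySetD sh i temp
            else PySem.List.pySetD sh i (PySem.List.pyGetD sh (i + 1) 0))
          i
          (PySem.List.pyGetD
            (if (i == c - 1) then PySem.List.pySetD sh i temp
              else PySem.List.pySetD sh i (PySem.List.pyGetD sh (i + 1) 0))
            (i + 1) 0)) a
    = a.take l ++ (a.drop (l+1)).take j ++ a.drop (l+j) := by
  intro j
  induction j with
  | zero =>
      intro _
      rw [show ((l : Int) + ((0 : Nat) : Int)) = (l : Int) from by push_cast; ring,
        PySem.List.pyRange_one_eq_nil (le_refl _), List.foldl_nil]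
      simp
  | succ j ih =>
      intro hle
      have h1 : ((l : Int) + ((j+1 : Nat) : Int)) = ((l : Int) + (j : Int)) + 1 := by
        push_cast; ring
      rw [h1, PySem.List.pyRange_one_succ_right (by omega), List.foldl_append,
        ih (by omega), List.foldl_cons, List.foldl_nil]
      have hcast : ((l : Int) + (j : Int)) = (((l + j : Nat)) : Int) := by push_cast; ring
      rw [hcast, shift_body_eq temp c _ (l+j)]
      have hl_le : l ≤ a.length := by omega
      have hj_le : j ≤ (a.drop (l+1)).length := by rw [List.length_drop]; omega
      have hplen : (a.take l ++ (a.drop (l+1)).take j).length = l + j := by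
        rw [List.length_append, List.length_take_of_le hl_le, List.length_take_of_le hj_le]
      have hXassoc : a.take l ++ (a.drop (l+1)).take j ++ a.drop (l+j)
          = (a.take l ++ (a.drop (l+1)).take j) ++ a.drop (l+j) := by
        rw [List.append_assoc]
      have htake : (a.drop (l+1)).take (j+1) = (a.drop (l+1)).take j ++ [a.getD (l+j+1) 0] := by
        rw [List.take_add_one]
        congr 1
        rw [show ((a.drop (l+1))[j]? = a[l+1+j]?) from List.getElem?_drop,
          show l+1+j = l+j+1 from by omega,
          List.getElem?_eq_getElem (show l+j+1 < a.length from by omega),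
          List.getD_eq_getElem?_getD,
          List.getElem?_eq_getElem (show l+j+1 < a.length from by omega)]
        rfl
      have hget : (a.take l ++ (a.drop (l+1)).take j ++ a.drop (l+j)).getD (l+j+1) 0
          = a.getD (l+j+1) 0 := by
        rw [hXassoc, List.getD_eq_getElem?_getD,
          List.getElem?_append_right (by rw [hplen]; omega), hplen,
          show l+j+1 - (l+j) = 1 from by omega,
          show ((a.drop (l+j))[1]? = a[(l+j)+1]?) from List.getElem?_drop,
          show (l+j)+1 = l+j+1 from rfl, List.getD_eq_getElem?_getD]
      have hset : (a.take l ++ (a.drop (l+1)).take j ++ a.drop (l+j)).set (l+j) (a.getD (l+j+1) 0)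
          = a.take l ++ (a.drop (l+1)).take (j+1) ++ a.drop (l+(j+1)) := by
        rw [hXassoc, List.set_append_right _ _ (by rw [hplen]), hplen, Nat.sub_self,
          List.drop_eq_getElem_cons (show l+j < a.length from by omega), List.set_cons_zero,
          htake, show l+(j+1) = l+j+1 from by omega]
        simp [List.append_assoc]
      rw [hget, hset]

theorem cyclic_shift_eq (a : List Int) (l r : Nat) (hlr : l < r) (hr : r < a.length) :
    cyclic_shift a (l : Int) (r : Int)
    = a.take l ++ (a.drop (l+1)).take (r-l) ++ a.getD l 0 :: a.drop (r+1) := by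
  have hne : (((l : Int)) == ((r : Int))) = false := by
    simp only [beq_eq_false_iff_ne, ne_eq, Int.natCast_inj]
    omega
  unfold cyclic_shift
  rw [hne]
  simp only [Bool.false_eq_true, ite_false, PySem.List.pyGetD_natCast]
  have hcast : (r : Int) = (l : Int) + ((r - l : Nat) : Int) := by
    push_cast [Nat.cast_sub hlr.le]; ring
  rw [hcast, shift_loop a l r ((l : Int) + ((r - l : Nat) : Int)) (a.getD l 0) hr (r - l) (by omega),
    show l + (r - l) = r from by omega, ← hcast]
  have hl_le : l ≤ a.length := by omega
  have hrl_le : r - l ≤ (a.drop (l+1)).length := by rw [List.length_drop]; omega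
  have hplen : (a.take l ++ (a.drop (l+1)).take (r-l)).length = r := by
    rw [List.length_append, List.length_take_of_le hl_le, List.length_take_of_le hrl_le]
    omega
  rw [PySem.List.pySetD_natCast, List.set_append_right _ _ (by rw [hplen]), hplen, Nat.sub_self,
    List.drop_eq_getElem_cons (show r < a.length from hr), List.set_cons_zero]

theorem decomp_a (a : List Int) (l r : Nat) (hlr : l < r) (hr : r < a.length) :
    a = a.take l ++ a.getD l 0 :: ((a.drop (l+1)).take (r-l) ++ a.drop (r+1)) := by
  conv_lhs => rw [← List.take_append_drop l a]
  congr 1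
  rw [List.drop_eq_getElem_cons (show l < a.length from by omega)]
  congr 1
  · rw [List.getD_eq_getElem?_getD, List.getElem?_eq_getElem (show l < a.length from by omega)]
    rfl
  · conv_lhs => rw [← List.take_append_drop (r-l) (a.drop (l+1))]
    rw [List.drop_drop]
    congr 2
    omega

theorem candidate_eq (a : List Int) (l r : Nat) (hlr : l < r) (hr : r < a.length) :
    count_inversions (cyclic_shift a (l : Int) (r : Int))
    = count_inversions a + pvD (a.getD l 0) ((a.drop (l+1)).take (r-l)) := by
  rw [count_inversions_eq_pvInv, count_inversions_eq_pvInv]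
  have hdec : pvInv a
      = pvInv (a.take l ++ a.getD l 0 :: ((a.drop (l+1)).take (r-l) ++ a.drop (r+1))) := by
    conv_lhs => rw [decomp_a a l r hlr hr]
  rw [cyclic_shift_eq a l r hlr hr, hdec, List.append_assoc, pvInv_rot]

theorem inner_loop (a : List Int) (n : Int) (l : Nat) (hn : n ≤ (a.length : Int)) :
    ∀ (j : Nat) (bd bl br : Int), bd ≤ 0 → (l : Int) + 1 + (j : Int) ≤ n →
    ∃ q : Int × Int × Int × Int,
      (PySem.List.pyRange ((l : Int) + 1) ((l : Int) + 1 + (j : Int)) 1).foldl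
          (fun (q : Int × Int × Int × Int) r =>
            let d := if PySem.List.pyGetD a r 0 > PySem.List.pyGetD a (l : Int) 0 then q.1 + 1 else q.1
            let d := if PySem.List.pyGetD a (l : Int) 0 > PySem.List.pyGetD a r 0 then d - 1 else d
            if d < q.2.1 then (d, d, (l : Int) + 1, r + 1) else (d, q.2))
          (0, bd, bl, br) = q
      ∧ (PySem.List.pyRange (l : Int) ((l : Int) + 1 + (j : Int)) 1).foldl
          (fun (st : Int × Int × Int) r =>
            let shifted := cyclic_shift a (l : Int) r
            let current_inversions := count_inversions shifted
            if current_inversions < st.1 then (current_inversions, (l : Int) + 1, r + 1) else st)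
          (count_inversions a + bd, bl, br) = (count_inversions a + q.2.1, q.2.2)
      ∧ q.1 = pvD (a.getD l 0) ((a.drop (l+1)).take j)
      ∧ q.2.1 ≤ 0 := by
  intro j
  induction j with
  | zero =>
      intro bd bl br hbd hk
      refine ⟨(0, bd, bl, br), ?_, ?_, ?_, hbd⟩
      · rw [show ((l : Int) + 1 + ((0 : Nat) : Int)) = (l : Int) + 1 from by push_cast; ring,
          PySem.List.pyRange_one_eq_nil (le_refl _), List.foldl_nil]
      · rw [show ((l : Int) + 1 + ((0 : Nat) : Int)) = (l : Int) + 1 from by push_cast; ring,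
          PySem.List.pyRange_one_singleton, List.foldl_cons, List.foldl_nil]
        dsimp only
        rw [cyclic_shift_self, if_neg (by omega : ¬ count_inversions a < count_inversions a + bd)]
      · simp [pvD]
  | succ j ih =>
      intro bd bl br hbd hk
      have hk' : (l : Int) + 1 + (j : Int) ≤ n := by push_cast at hk ⊢; omega
      obtain ⟨⟨qd, qbd, qbl, qbr⟩, hB, hA, hq1, hq21⟩ := ih bd bl br hbd hk'
      dsimp only at hA hq1 hq21
      have hsplit : ((l : Int) + 1 + ((j+1 : Nat) : Int)) = ((l : Int) + 1 + (j : Int)) + 1 := by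
        push_cast; ring
      have hr : ((l : Int) + 1 + (j : Int)) = ((l + 1 + j : Nat) : Int) := by push_cast; ring
      have hrlen : l + 1 + j < a.length := by
        have h1 : ((l + 1 + j : Nat) : Int) < (a.length : Int) := by push_cast at hk hn ⊢; omega
        exact_mod_cast h1
      have hlr : l < l + 1 + j := by omega
      rw [hsplit, PySem.List.pyRange_one_succ_right (by omega),
        PySem.List.pyRange_one_succ_right (by omega), List.foldl_append,
        List.foldl_append, hB, hA, List.foldl_cons, List.foldl_nil, List.foldl_cons,
        List.foldl_nil, hr]
      dsimp only
      rw [candidate_eq a l (l+1+j) hlr hrlen, show l + 1 + j - l = j + 1 from by omega]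
      have hx : PySem.List.pyGetD a ((l : Nat) : Int) 0 = a.getD l 0 :=
        PySem.List.pyGetD_natCast a l 0
      have hy : PySem.List.pyGetD a ((l + 1 + j : Nat) : Int) 0 = a.getD (l+1+j) 0 :=
        PySem.List.pyGetD_natCast a (l+1+j) 0
      simp only [hx, hy, gt_iff_lt]
      have hq1' : qd = pvD (a.getD l 0) ((a.drop (l+1)).take j) := hq1
      have htake : (a.drop (l+1)).take (j+1)
          = (a.drop (l+1)).take j ++ [a.getD (l+1+j) 0] := by
        rw [List.take_add_one]
        congr 1
        rw [show ((a.drop (l+1))[j]? = a[l+1+j]?) from List.getElem?_drop,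
          List.getElem?_eq_getElem (show l+1+j < a.length from hrlen),
          List.getD_eq_getElem?_getD,
          List.getElem?_eq_getElem (show l+1+j < a.length from hrlen)]
        rfl
      have hD : pvD (a.getD l 0) ((a.drop (l+1)).take (j+1))
          = ((if a.getD (l+1+j) 0 < a.getD l 0 then
              (if a.getD l 0 < a.getD (l+1+j) 0 then qd + 1 else qd) - 1
             else (if a.getD l 0 < a.getD (l+1+j) 0 then qd + 1 else qd))) := by
        rw [htake, pvD_append_singleton, hq1']
        split_ifs <;> ring
      rw [← hD]
      by_cases hlt : pvD (a.getD l 0) ((a.drop (l+1)).take (j+1)) < qbd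
      · rw [if_pos hlt, if_pos (show count_inversions a + pvD (a.getD l 0) ((a.drop (l+1)).take (j+1))
            < count_inversions a + qbd from by omega)]
        exact ⟨(pvD (a.getD l 0) ((a.drop (l+1)).take (j+1)),
          pvD (a.getD l 0) ((a.drop (l+1)).take (j+1)), (l : Int) + 1, ((l + 1 + j : Nat) : Int) + 1),
          rfl, rfl, rfl, by dsimp only; omega⟩
      · rw [if_neg hlt, if_neg (show ¬ (count_inversions a + pvD (a.getD l 0) ((a.drop (l+1)).take (j+1))
            < count_inversions a + qbd) from by omega)]
        exact ⟨(pvD (a.getD l 0) ((a.drop (l+1)).take (j+1)), qbd, qbl, qbr),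
          rfl, rfl, rfl, hq21⟩

theorem outer_loop (a : List Int) (n : Int) (hn : n ≤ (a.length : Int)) :
    ∀ (lst : List Int), (∀ x ∈ lst, 0 ≤ x ∧ x < n) → ∀ (bd bl br : Int), bd ≤ 0 →
    ∃ st : Int × Int × Int,
      lst.foldl
        (fun (st : Int × Int × Int) l =>
          ((PySem.List.pyRange (l + 1) n 1).foldl
            (fun (q : Int × Int × Int × Int) r =>
              let d := if PySem.List.pyGetD a r 0 > PySem.List.pyGetD a l 0 then q.1 + 1 else q.1
              let d := if PySem.List.pyGetD a l 0 > PySem.List.pyGetD a r 0 then d - 1 else d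
              if d < q.2.1 then (d, d, l + 1, r + 1) else (d, q.2)) (0, st)).2)
        (bd, bl, br) = st
      ∧ lst.foldl
          (fun (st : Int × Int × Int) l =>
            (PySem.List.pyRange l n 1).foldl
              (fun (st : Int × Int × Int) r =>
                let shifted := cyclic_shift a l r
                let current_inversions := count_inversions shifted
                if current_inversions < st.1 then (current_inversions, l + 1, r + 1) else st) st)
          (count_inversions a + bd, bl, br) = (count_inversions a + st.1, st.2)
      ∧ st.1 ≤ 0 := by
  intro lst
  induction lst with
  | nil =>
      intro _ bd bl br hbd
      exact ⟨(bd, bl, br), rfl, rfl, hbd⟩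
  | cons l rest ih =>
      intro hmem bd bl br hbd
      obtain ⟨hl0, hln⟩ := hmem l (List.mem_cons_self ..)
      have hlcast : l = ((l.toNat : Nat) : Int) := by omega
      have hjdef : n = ((l.toNat : Nat) : Int) + 1 + (((n - l - 1).toNat : Nat) : Int) := by omega
      obtain ⟨q, hB, hA, _, hq21⟩ :=
        inner_loop a n l.toNat hn (n - l - 1).toNat bd bl br hbd (by omega)
      rw [List.foldl_cons, List.foldl_cons]
      dsimp only
      rw [hlcast, hjdef, hB, hA, ← hjdef]
      exact ih (fun x hx => hmem x (List.mem_cons_of_mem _ hx)) q.2.1 q.2.2.1 q.2.2.2 hq21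

-- ===== VERDICT (by name: the statement is the Claim_ definition above) =====
theorem find_optimal_shift_spec : Claim_equal_find_optimal_shift := by
  intro n a _ hpre
  unfold Spec_find_optimal_shift
  by_cases h0 : n ≤ 0
  · simp [find_optimal_shift, find_optimal_shift_alt, PySem.List.pyRange_one_eq_nil h0]
  · by_cases hn : n ≤ (a.length : Int)
    · unfold find_optimal_shift find_optimal_shift_alt
      obtain ⟨st, hB, hA, _⟩ := outer_loop a n hn (PySem.List.pyRange 0 n 1)
        (fun x hx => by rw [PySem.List.mem_pyRange_one] at hx; exact hx) 0 1 1 (le_refl 0)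
      rw [add_zero] at hA
      dsimp only
      rw [hA, hB]
    · have h1 : n = 1 := by rcases hpre with h | h <;> omega
      have ha : a = [] := by
        have hlen : a.length = 0 := by omega
        exact List.length_eq_zero_iff.mp hlen
      subst h1
      subst ha
      decide
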